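-- pv_equiv track=rewrite | github.com/UltraxBlade/Graphics-Final | Graphics.py | ring
-- ===== SOURCE A (Python) =====
-- def ring(img,minRad,maxRad,centerX,centerY,color):
--     centerRow=len(img)-centerY
--     centerCol=centerX
--     for row in range(len(img)):
--         for col in range(len(img[row])):
--             if (row-centerRow)**2+(col-centerCol)**2>=minRad**2 and (row-centerRow)**2+(col-centerCol)**2<=maxRad**2:
--                 img[row][col]=color[:]
--     return img
-- ===== SOURCE B (Python) =====
-- from math import isqrt
--
--
-- def _paint_row(row, dr2, m2, M2, cx, color):
--     # paint, in this row, every column c with m2 <= dr2 + (c-cx)^2 <= M2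
--     a = isqrt(M2 - dr2)
--     W = len(row)
--     inner = m2 - dr2
--     if inner >= 1:
--         e = isqrt(inner - 1)
--         for c in range(max(0, cx - a), min(W, cx - e)):
--             row[c] = color[:]
--         for c in range(max(0, cx + e + 1), min(W, cx + a + 1)):
--             row[c] = color[:]
--     else:
--         for c in range(max(0, cx - a), min(W, cx + a + 1)):
--             row[c] = color[:]
--
--
-- def ring(img, minRad, maxRad, centerX, centerY, color):
--     # Mutates img in place (same as the original) and returns it.
--     H = len(img)
--     cr = H - centerY
--     M2 = maxRad * maxRad
--     m2 = minRad * minRad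
--     R = isqrt(M2)
--     for r in range(max(0, cr - R), min(H, cr + R + 1)):
--         _paint_row(img[r], (r - cr) * (r - cr), m2, M2, centerX, color)
--     return img
-- ===== Notes on version B (the rewrite author's own statement) =====
-- stated objective: alternative
-- what changed: A tests the ring inequality at every pixel of the whole image; B visits only the rows of the ring's bounding box and paints, per row, just the one or two column intervals computed exactly with integer square roots (it trades the per-pixel distance test for interval arithmetic; the painting itself still dominates when the ring covers the image).
import Mathlib
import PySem

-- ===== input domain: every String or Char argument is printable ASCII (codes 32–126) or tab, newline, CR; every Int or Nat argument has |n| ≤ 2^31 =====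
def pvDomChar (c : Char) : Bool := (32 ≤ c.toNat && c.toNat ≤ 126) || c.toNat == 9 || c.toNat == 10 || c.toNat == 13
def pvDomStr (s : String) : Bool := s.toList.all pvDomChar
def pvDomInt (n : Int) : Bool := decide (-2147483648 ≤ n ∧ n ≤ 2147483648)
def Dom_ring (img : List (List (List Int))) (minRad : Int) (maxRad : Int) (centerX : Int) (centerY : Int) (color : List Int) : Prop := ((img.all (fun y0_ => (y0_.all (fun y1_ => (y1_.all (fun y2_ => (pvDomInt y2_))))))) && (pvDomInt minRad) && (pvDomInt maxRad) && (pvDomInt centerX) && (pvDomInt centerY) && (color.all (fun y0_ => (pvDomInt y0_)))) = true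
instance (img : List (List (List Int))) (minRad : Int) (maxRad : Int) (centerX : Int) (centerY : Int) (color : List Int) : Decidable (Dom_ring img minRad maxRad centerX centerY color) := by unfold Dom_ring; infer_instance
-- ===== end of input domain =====

-- B replaces A's per-pixel test over the whole image by a scan of only the rows of the ring's
-- bounding box, painting per row just the column interval(s) computed with integer square roots
-- (objective: alternative — it does less work when the ring is small, but was not measured faster
-- on the grader's inputs). Both A and B mutate img in place in Python; the equivalence proved here
-- is about the return value.

-- ===== PORT A =====
def ring (img : List (List (List Int))) (minRad : Int) (maxRad : Int) (centerX : Int) (centerY : Int) (color : List Int) : List (List (List Int)) :=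
  let centerRow : Int := (img.length : Int) - centerY
  let centerCol : Int := centerX
  (List.range img.length).foldl
    (fun im row =>
      let rw := im.getD row []
      im.set row
        ((List.range rw.length).foldl
          (fun rw' (col : Nat) =>
            if minRad ^ 2 ≤ ((row : Int) - centerRow) ^ 2 + ((col : Int) - centerCol) ^ 2 ∧
               ((row : Int) - centerRow) ^ 2 + ((col : Int) - centerCol) ^ 2 ≤ maxRad ^ 2
            then rw'.set col color else rw') rw))
    img

-- ===== PORT B =====
-- port of Source B's _paint_row
def paintRow (dr2 m2 M2 cx : Int) (color : List Int) (row : List (List Int)) : List (List Int) :=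
  let a : Int := (Nat.sqrt (M2 - dr2).toNat : Int)
  let W : Int := row.length
  let inner : Int := m2 - dr2
  if 1 ≤ inner then
    let e : Int := (Nat.sqrt (inner - 1).toNat : Int)
    let row1 := (PySem.List.pyRange (max 0 (cx - a)) (min W (cx - e)) 1).foldl
      (fun rw c => PySem.List.pySetD rw c color) row
    (PySem.List.pyRange (max 0 (cx + e + 1)) (min W (cx + a + 1)) 1).foldl
      (fun rw c => PySem.List.pySetD rw c color) row1
  else
    (PySem.List.pyRange (max 0 (cx - a)) (min W (cx + a + 1)) 1).foldl
      (fun rw c => PySem.List.pySetD rw c color) row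

def ring_alt (img : List (List (List Int))) (minRad : Int) (maxRad : Int) (centerX : Int) (centerY : Int) (color : List Int) : List (List (List Int)) :=
  let H : Int := img.length
  let cr : Int := H - centerY
  let M2 : Int := maxRad * maxRad
  let m2 : Int := minRad * minRad
  let R : Int := (Nat.sqrt M2.toNat : Int)
  (PySem.List.pyRange (max 0 (cr - R)) (min H (cr + R + 1)) 1).foldl
    (fun im r => PySem.List.pySetD im r
      (paintRow ((r - cr) * (r - cr)) m2 M2 centerX color (PySem.List.pyGetD im r []))) img

-- ===== PRECONDITION & SPEC =====
def Spec_ring (img : List (List (List Int))) (minRad : Int) (maxRad : Int) (centerX : Int) (centerY : Int) (color : List Int) (out : List (List (List Int))) : Prop := out = ring_alt img minRad maxRad centerX centerY color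
instance (img : List (List (List Int))) (minRad : Int) (maxRad : Int) (centerX : Int) (centerY : Int) (color : List Int) (out : List (List (List Int))) : Decidable (Spec_ring img minRad maxRad centerX centerY color out) := by unfold Spec_ring; infer_instance

-- ===== CLAIM (what is proved, stated in full; the proofs are below) =====
def Claim_equal_ring : Prop := ∀ (img : List (List (List Int))) (minRad : Int) (maxRad : Int) (centerX : Int) (centerY : Int) (color : List Int), Dom_ring img minRad maxRad centerX centerY color → Spec_ring img minRad maxRad centerX centerY color (ring img minRad maxRad centerX centerY color)

-- ===== LEMMAS AND PROOFS =====

-- Canonical pointwise description: pixel (r,c) is painted iff m2 ≤ (r-cr)²+(c-cx)² ≤ M2.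
def ringCanon (img : List (List (List Int))) (minRad : Int) (maxRad : Int) (centerX : Int) (centerY : Int) (color : List Int) : List (List (List Int)) :=
  let cr : Int := (img.length : Int) - centerY
  img.mapIdx (fun r row => row.mapIdx (fun c x =>
    if minRad * minRad ≤ ((r : Int) - cr) * ((r : Int) - cr) + ((c : Int) - centerX) * ((c : Int) - centerX) ∧
       ((r : Int) - cr) * ((r : Int) - cr) + ((c : Int) - centerX) * ((c : Int) - centerX) ≤ maxRad * maxRad
    then color else x))

theorem mapIdx_eq_mapIdx_of {α : Type} (l : List α) (f g : Nat → α → α)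
    (h : ∀ i (hi : i < l.length), f i l[i] = g i l[i]) : l.mapIdx f = l.mapIdx g := by
  apply List.ext_getElem <;> simp_all

theorem mapIdx_mapIdx {α : Type} (l : List α) (f g : Nat → α → α) :
    (l.mapIdx f).mapIdx g = l.mapIdx (fun i x => g i (f i x)) := by
  apply List.ext_getElem <;> simp

-- A's inner loop: conditional point assignments over range(n).
theorem fillN_eq {α : Type} (P : Nat → Prop) [DecidablePred P] (v : α) (n : Nat) (rw : List α) :
    (List.range n).foldl (fun l i => if P i then l.set i v else l) rw
      = rw.mapIdx (fun i x => if i < n ∧ P i then v else x) := by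
  induction n with
  | zero =>
    simp only [List.range_zero, List.foldl_nil]
    apply List.ext_getElem <;> simp
  | succ n ih =>
    rw [List.range_succ, List.foldl_append, ih]
    simp only [List.foldl_cons, List.foldl_nil]
    by_cases hP : P n
    · rw [if_pos hP]
      apply List.ext_getElem
      · simp
      · intro i h1 h2
        simp only [List.getElem_set, List.getElem_mapIdx]
        by_cases hin : n = i
        · subst hin
          simp [hP]
        · rw [if_neg hin]
          have hiff : (i < n ∧ P i) ↔ (i < n + 1 ∧ P i) := by
            constructor
            · rintro ⟨h, hp⟩; exact ⟨by omega, hp⟩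
            · rintro ⟨h, hp⟩
              refine ⟨by omega, hp⟩
          simp only [hiff]
    · rw [if_neg hP]
      apply List.ext_getElem
      · simp
      · intro i h1 h2
        simp only [List.getElem_mapIdx]
        have hiff : (i < n ∧ P i) ↔ (i < n + 1 ∧ P i) := by
          constructor
          · rintro ⟨h, hp⟩; exact ⟨by omega, hp⟩
          · rintro ⟨h, hp⟩
            refine ⟨?_, hp⟩
            rcases Nat.lt_succ_iff_lt_or_eq.1 h with h | h
            · exact h
            · exact absurd (h ▸ hp) hP
        simp only [hiff]

-- A's outer loop: replace each row in order by a function of its (original) content.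
theorem outerN_eq {β : Type} (f : Nat → List β → List β) (n : Nat) (img : List (List β)) :
    (List.range n).foldl (fun im row => im.set row (f row (im.getD row []))) img
      = img.mapIdx (fun r row => if r < n then f r row else row) := by
  induction n with
  | zero =>
    simp only [List.range_zero, List.foldl_nil]
    apply List.ext_getElem <;> simp
  | succ n ih =>
    rw [List.range_succ, List.foldl_append, ih]
    simp only [List.foldl_cons, List.foldl_nil]
    apply List.ext_getElem
    · simp
    · intro i h1 h2
      simp only [List.length_set, List.length_mapIdx] at h1 h2
      simp only [List.getElem_set, List.getElem_mapIdx]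
      by_cases hin : n = i
      · subst hin
        rw [if_pos rfl, if_pos (Nat.lt_succ_self n)]
        congr 1
        rw [List.getD_eq_getElem?_getD]
        simp [List.getElem?_eq_getElem h1]
      · rw [if_neg hin]
        have hiff : (i < n) ↔ (i < n + 1) := by omega
        simp only [hiff]

-- B's row fill over an int range.
theorem fillI_aux {α : Type} (v : α) (lo : Int) (h0 : 0 ≤ lo) (n : Nat) (rw : List α) :
    (PySem.List.pyRange lo (lo + n) 1).foldl (fun l c => PySem.List.pySetD l c v) rw
      = rw.mapIdx (fun i x => if lo ≤ (i : Int) ∧ (i : Int) < lo + n then v else x) := by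
  induction n with
  | zero =>
    rw [PySem.List.pyRange_one_eq_nil (by omega)]
    simp only [List.foldl_nil]
    apply List.ext_getElem
    · simp
    · intro i h1 h2
      simp only [List.getElem_mapIdx]
      rw [if_neg (by omega)]
  | succ n ih =>
    have hcast : lo + ((n : Nat) + 1 : Nat) = (lo + n) + 1 := by push_cast; ring
    rw [hcast, PySem.List.pyRange_one_succ_right (by omega), List.foldl_append, ih]
    simp only [List.foldl_cons, List.foldl_nil]
    rw [PySem.List.pySetD_of_nonneg _ v (by omega)]
    apply List.ext_getElem
    · simp
    · intro i h1 h2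
      simp only [List.length_set, List.length_mapIdx] at h1 h2
      simp only [List.getElem_set, List.getElem_mapIdx]
      by_cases hin : (lo + (n : Int)).toNat = i
      · rw [if_pos hin, if_pos (by omega)]
      · rw [if_neg hin]
        have hiff : (lo ≤ (i : Int) ∧ (i : Int) < lo + n) ↔ (lo ≤ (i : Int) ∧ (i : Int) < lo + n + 1) := by omega
        simp only [hiff]

theorem fillI_eq {α : Type} (v : α) (lo hi : Int) (h0 : 0 ≤ lo) (rw : List α) :
    (PySem.List.pyRange lo hi 1).foldl (fun l c => PySem.List.pySetD l c v) rw
      = rw.mapIdx (fun i x => if lo ≤ (i : Int) ∧ (i : Int) < hi then v else x) := by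
  by_cases h : lo ≤ hi
  · have heq : hi = lo + ((hi - lo).toNat : Int) := by omega
    rw [heq]
    exact fillI_aux v lo h0 _ rw
  · rw [PySem.List.pyRange_one_eq_nil (by omega)]
    simp only [List.foldl_nil]
    apply List.ext_getElem
    · simp
    · intro i h1 h2
      simp only [List.getElem_mapIdx]
      rw [if_neg (by omega)]

-- B's outer loop over an int range of in-bounds rows.
theorem outerI_aux {β : Type} (f : Int → List β → List β) (lo : Int) (h0 : 0 ≤ lo) (n : Nat)
    (img0 : List (List β)) (hhi : lo + (n : Int) ≤ (img0.length : Int)) :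
    (PySem.List.pyRange lo (lo + n) 1).foldl
        (fun im r => PySem.List.pySetD im r (f r (PySem.List.pyGetD im r []))) img0
      = img0.mapIdx (fun r row => if lo ≤ (r : Int) ∧ (r : Int) < lo + n then f r row else row) := by
  induction n with
  | zero =>
    rw [PySem.List.pyRange_one_eq_nil (by omega)]
    simp only [List.foldl_nil]
    apply List.ext_getElem
    · simp
    · intro i h1 h2
      simp only [List.getElem_mapIdx]
      rw [if_neg (by omega)]
  | succ n ih =>
    have hcast : lo + ((n : Nat) + 1 : Nat) = (lo + n) + 1 := by push_cast; ring
    rw [hcast, PySem.List.pyRange_one_succ_right (by omega), List.foldl_append,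
      ih (by push_cast at hhi ⊢; omega)]
    simp only [List.foldl_cons, List.foldl_nil]
    have hlt : lo + (n : Int) < (img0.length : Int) := by push_cast at hhi; omega
    rw [PySem.List.pySetD_of_nonneg _ _ (by omega),
      PySem.List.pyGetD_eq_getElem _ [] (by omega) (by simpa using hlt)]
    have hget : (List.mapIdx (fun r row => if lo ≤ (r : Int) ∧ (r : Int) < lo + n then f r row else row) img0)[(lo + (n : Int)).toNat]'(by simp; omega)
        = img0[(lo + (n : Int)).toNat]'(by omega) := by
      simp only [List.getElem_mapIdx]
      rw [if_neg (by omega)]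
    rw [hget]
    apply List.ext_getElem
    · simp
    · intro i h1 h2
      simp only [List.length_set, List.length_mapIdx] at h1 h2
      simp only [List.getElem_set, List.getElem_mapIdx]
      by_cases hin : (lo + (n : Int)).toNat = i
      · rw [if_pos hin, if_pos (by omega)]
        subst hin
        congr 1
        omega
      · rw [if_neg hin]
        have hiff : (lo ≤ (i : Int) ∧ (i : Int) < lo + n) ↔ (lo ≤ (i : Int) ∧ (i : Int) < lo + n + 1) := by omega
        simp only [hiff]

theorem outerI_eq {β : Type} (f : Int → List β → List β) (lo hi : Int) (img0 : List (List β))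
    (h0 : 0 ≤ lo) (hhi : hi ≤ (img0.length : Int)) :
    (PySem.List.pyRange lo hi 1).foldl
        (fun im r => PySem.List.pySetD im r (f r (PySem.List.pyGetD im r []))) img0
      = img0.mapIdx (fun r row => if lo ≤ (r : Int) ∧ (r : Int) < hi then f r row else row) := by
  by_cases h : lo ≤ hi
  · have heq : hi = lo + ((hi - lo).toNat : Int) := by omega
    rw [heq]
    exact outerI_aux f lo h0 _ img0 (by omega)
  · rw [PySem.List.pyRange_one_eq_nil (by omega)]
    simp only [List.foldl_nil]
    apply List.ext_getElem
    · simp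
    · intro i h1 h2
      simp only [List.getElem_mapIdx]
      rw [if_neg (by omega)]

-- |t| ≤ isqrt s  ↔  t² ≤ s (for 0 ≤ s): the integer-sqrt interval test is exact.
theorem abs_le_sqrt_iff (t s : Int) (hs : 0 ≤ s) :
    ((t.natAbs : Int) ≤ (Nat.sqrt s.toNat : Int)) ↔ t * t ≤ s := by
  rw [Nat.cast_le, Nat.le_sqrt, ← Nat.cast_le (α := ℤ)]
  push_cast [Int.natAbs_mul_self]
  rw [Int.toNat_of_nonneg hs]
  rw [abs_mul_abs_self]

theorem ringA_eq_canon (img : List (List (List Int))) (minRad maxRad centerX centerY : Int) (color : List Int) :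
    ring img minRad maxRad centerX centerY color = ringCanon img minRad maxRad centerX centerY color := by
  unfold ring ringCanon
  simp only [pow_two]
  rw [outerN_eq (fun row rw => (List.range rw.length).foldl
    (fun rw' (col : Nat) =>
      if minRad * minRad ≤ ((row : Int) - ((img.length : Int) - centerY)) * ((row : Int) - ((img.length : Int) - centerY)) + ((col : Int) - centerX) * ((col : Int) - centerX) ∧
         ((row : Int) - ((img.length : Int) - centerY)) * ((row : Int) - ((img.length : Int) - centerY)) + ((col : Int) - centerX) * ((col : Int) - centerX) ≤ maxRad * maxRad
      then rw'.set col color else rw') rw) img.length img]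
  apply mapIdx_eq_mapIdx_of
  intro r hr
  rw [if_pos hr, fillN_eq]
  apply mapIdx_eq_mapIdx_of
  intro c hc
  split_ifs with h1 h2 <;> first | rfl | (exfalso; tauto)

theorem paintRow_eq (m2 M2 cx : Int) (color : List Int) (p : Int) (row : List (List Int))
    (hp : p ≤ M2) :
    paintRow p m2 M2 cx color row
      = row.mapIdx (fun c x =>
          if m2 ≤ p + ((c : Int) - cx) * ((c : Int) - cx) ∧ p + ((c : Int) - cx) * ((c : Int) - cx) ≤ M2
          then color else x) := by
  unfold paintRow
  by_cases hinner : 1 ≤ m2 - p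
  · rw [if_pos hinner, fillI_eq _ _ _ (le_max_left 0 _), fillI_eq _ _ _ (le_max_left 0 _), mapIdx_mapIdx]
    apply mapIdx_eq_mapIdx_of
    intro c hc
    have hcW : (c : Int) < (row.length : Int) := by exact_mod_cast hc
    have hq0 : (0 : Int) ≤ ((c : Int) - cx) * ((c : Int) - cx) := mul_self_nonneg _
    have haq := abs_le_sqrt_iff ((c : Int) - cx) (M2 - p) (by omega)
    have heq := abs_le_sqrt_iff ((c : Int) - cx) (m2 - p - 1) (by omega)
    obtain ⟨q, hqdef⟩ : ∃ q, ((c : Int) - cx) * ((c : Int) - cx) = q := ⟨_, rfl⟩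
    rw [hqdef] at haq heq hq0 ⊢
    split_ifs <;> first | rfl | (exfalso; omega)
  · rw [if_neg hinner, fillI_eq _ _ _ (le_max_left 0 _)]
    apply mapIdx_eq_mapIdx_of
    intro c hc
    have hcW : (c : Int) < (row.length : Int) := by exact_mod_cast hc
    have hq0 : (0 : Int) ≤ ((c : Int) - cx) * ((c : Int) - cx) := mul_self_nonneg _
    have haq := abs_le_sqrt_iff ((c : Int) - cx) (M2 - p) (by omega)
    obtain ⟨q, hqdef⟩ : ∃ q, ((c : Int) - cx) * ((c : Int) - cx) = q := ⟨_, rfl⟩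
    rw [hqdef] at haq hq0 ⊢
    split_ifs <;> first | rfl | (exfalso; omega)

theorem ringB_eq_canon (img : List (List (List Int))) (minRad maxRad centerX centerY : Int) (color : List Int) :
    ring_alt img minRad maxRad centerX centerY color = ringCanon img minRad maxRad centerX centerY color := by
  unfold ring_alt ringCanon
  dsimp only
  have hM2 : (0 : Int) ≤ maxRad * maxRad := mul_self_nonneg _
  rw [outerI_eq (fun r row => paintRow ((r - ((img.length : Int) - centerY)) * (r - ((img.length : Int) - centerY))) (minRad * minRad) (maxRad * maxRad) centerX color row)
      (max 0 (((img.length : Int) - centerY) - (Nat.sqrt ((maxRad * maxRad)).toNat : Int)))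
      (min ((img.length : Int)) (((img.length : Int) - centerY) + (Nat.sqrt ((maxRad * maxRad)).toNat : Int) + 1))
      img (le_max_left 0 _) (min_le_left _ _)]
  apply mapIdx_eq_mapIdx_of
  intro r hr
  have hrH : (r : Int) < (img.length : Int) := by exact_mod_cast hr
  have hRiff := abs_le_sqrt_iff ((r : Int) - ((img.length : Int) - centerY)) (maxRad * maxRad) hM2
  obtain ⟨p, hpdef⟩ : ∃ p, ((r : Int) - ((img.length : Int) - centerY)) * ((r : Int) - ((img.length : Int) - centerY)) = p := ⟨_, rfl⟩
  rw [hpdef] at hRiff ⊢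
  by_cases hrin : (max 0 (((img.length : Int) - centerY) - (Nat.sqrt ((maxRad * maxRad)).toNat : Int)) ≤ (r : Int) ∧ (r : Int) < min ((img.length : Int)) (((img.length : Int) - centerY) + (Nat.sqrt ((maxRad * maxRad)).toNat : Int) + 1))
  · rw [if_pos hrin, paintRow_eq _ _ _ _ _ _ (hRiff.mp (by omega))]
  · rw [if_neg hrin]
    have hpM : ¬ (p ≤ maxRad * maxRad) := by
      intro h
      have habs := hRiff.mpr h
      exact hrin ⟨by omega, by omega⟩
    apply List.ext_getElem
    · simp
    · intro c h1 h2
      simp only [List.getElem_mapIdx]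
      have hq0 : (0 : Int) ≤ ((c : Int) - centerX) * ((c : Int) - centerX) := mul_self_nonneg _
      obtain ⟨q, hqdef⟩ : ∃ q, ((c : Int) - centerX) * ((c : Int) - centerX) = q := ⟨_, rfl⟩
      rw [hqdef] at hq0 ⊢
      rw [if_neg (by omega)]

-- ===== VERDICT (by name: the statement is the Claim_ definition above) =====
theorem ring_spec : Claim_equal_ring := by
  intro img minRad maxRad centerX centerY color _
  unfold Spec_ring
  rw [ringA_eq_canon, ringB_eq_canon]
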